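-- pv_equiv track=rewrite | github.com/weltonvaz/Coursera | Python3/1a. parte/7semana/soma_hipotenusas.py | soma_hipotenusas
-- ===== SOURCE A (Python) =====
-- def é_hipotenusa(a, b):
--     return ((a*a) + (b*b))
--
-- def soma_hipotenusas(n):
--     c = 1
--     soma = 0
--     while (c <= n):
--         euclides = (c*c)
--         a = 1
--         b = 1
--         while (a < n):
--             while (b < n):
--                 if (euclides == é_hipotenusa(a, b)):
--                     soma = soma + c
--                     a = n
--                     break
--                 b += 1
--             a += 1
--             b = a
--         c += 1
--
--     return soma
-- ===== SOURCE B (Python) =====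
-- def soma_hipotenusas(n):
--     soma = 0
--     for c in range(1, n + 1):
--         a, b = 1, n - 1
--         while a <= b:
--             s = a * a + b * b
--             if s == c * c:
--                 soma += c
--                 break
--             if s < c * c:
--                 a += 1
--             else:
--                 b -= 1
--     return soma
-- ===== Notes on version B (the rewrite author's own statement) =====
-- stated objective: faster
-- what changed: Replaces A's triple-nested O(n^3) scan (for each c, all pairs a<=b<n) by a per-c two-pointer sweep from (1, n-1), O(n^2) total.
import Mathlib
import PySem

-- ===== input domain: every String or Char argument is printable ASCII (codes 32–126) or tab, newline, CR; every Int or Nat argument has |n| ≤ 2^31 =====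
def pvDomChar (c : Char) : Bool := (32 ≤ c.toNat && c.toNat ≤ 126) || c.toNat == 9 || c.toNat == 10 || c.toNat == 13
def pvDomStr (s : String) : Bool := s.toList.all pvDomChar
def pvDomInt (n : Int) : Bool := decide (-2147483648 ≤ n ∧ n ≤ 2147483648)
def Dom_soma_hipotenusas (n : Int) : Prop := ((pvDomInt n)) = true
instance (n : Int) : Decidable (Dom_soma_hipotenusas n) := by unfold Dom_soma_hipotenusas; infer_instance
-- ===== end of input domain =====

-- B replaces A's triple-nested pair scan by a per-c two-pointer sweep (a different algorithm; measured faster).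

-- ===== PORT A =====
-- def é_hipotenusa(a, b): return a*a + b*b
def e_hipotenusa (a b : Int) : Int := a * a + b * b

-- innermost 'while (b < n)': true iff the 'break' was hit (euclides == é_hipotenusa(a, b))
def loopB (n euclides a b : Int) : Bool :=
  if b < n then
    if euclides == e_hipotenusa a b then true
    else loopB n euclides a (b + 1)
  else false
termination_by (n - b).toNat
decreasing_by omega

-- middle 'while (a < n)'; after the break A sets a = n, ending the loop with a hit recorded,
-- so the loop is equivalent to returning true at the hit; b restarts at a (b = a after a += 1)
def loopA (n euclides a : Int) : Bool :=
  if a < n then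
    if loopB n euclides a a then true
    else loopA n euclides (a + 1)
  else false
termination_by (n - a).toNat
decreasing_by omega

-- outer 'while (c <= n)' accumulating soma
def loopC (n c soma : Int) : Int :=
  if c ≤ n then
    loopC n (c + 1) (if loopA n (c * c) 1 then soma + c else soma)
  else soma
termination_by (n + 1 - c).toNat
decreasing_by omega

def soma_hipotenusas (n : Int) : Int := loopC n 1 0

-- ===== PORT B =====
-- 'while a <= b' two-pointer loop of Source B: true iff the break (a*a + b*b == c*c) was hit
def twoPtr (c a b : Int) : Bool :=
  if a ≤ b then
    let s := a * a + b * b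
    if s == c * c then true
    else if s < c * c then twoPtr c (a + 1) b
    else twoPtr c a (b - 1)
  else false
termination_by (b + 1 - a).toNat
decreasing_by all_goals omega

-- 'for c in range(1, n+1)' accumulating soma
def soma_hipotenusas_alt (n : Int) : Int :=
  (PySem.List.pyRange 1 (n + 1) 1).foldl
    (fun soma c => if twoPtr c 1 (n - 1) then soma + c else soma) 0

-- ===== PRECONDITION & SPEC =====
def Spec_soma_hipotenusas (n : Int) (out : Int) : Prop := out = soma_hipotenusas_alt n
instance (n : Int) (out : Int) : Decidable (Spec_soma_hipotenusas n out) := by unfold Spec_soma_hipotenusas; infer_instance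

-- ===== CLAIM (what is proved, stated in full; the proofs are below) =====
def Claim_equal_soma_hipotenusas : Prop := ∀ (n : Int), Dom_soma_hipotenusas n → Spec_soma_hipotenusas n (soma_hipotenusas n)

-- ===== LEMMAS AND PROOFS =====

-- A's innermost loop finds some y ∈ [b, n) with euclides = a² + y²
theorem loopB_iff (n euclides a b : Int) :
    loopB n euclides a b = true ↔ ∃ y, b ≤ y ∧ y < n ∧ euclides = a * a + y * y := by
  induction b using loopB.induct (n := n) (euclides := euclides) (a := a) with
  | case1 b hb heq =>
    rw [loopB, if_pos hb, if_pos heq]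
    simp only [beq_iff_eq, e_hipotenusa] at heq
    exact iff_of_true rfl ⟨b, le_rfl, hb, heq⟩
  | case2 b hb hne ih =>
    rw [loopB]
    simp only [beq_iff_eq, e_hipotenusa] at hne
    simp only [if_pos hb, e_hipotenusa, beq_iff_eq, if_neg hne, ih]
    constructor
    · rintro ⟨y, h1, h2, h3⟩; exact ⟨y, by omega, h2, h3⟩
    · rintro ⟨y, h1, h2, h3⟩
      refine ⟨y, ?_, h2, h3⟩
      rcases eq_or_lt_of_le h1 with h | h
      · exact absurd (h ▸ h3) hne
      · omega
  | case3 b hb =>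
    rw [loopB]
    simp only [if_neg hb, Bool.false_eq_true, false_iff]
    rintro ⟨y, h1, h2, _⟩; omega

-- A's middle loop finds some pair a ≤ x ≤ y < n with euclides = x² + y²
theorem loopA_iff (n euclides a : Int) :
    loopA n euclides a = true ↔
      ∃ x y, a ≤ x ∧ x ≤ y ∧ y < n ∧ euclides = x * x + y * y := by
  induction a using loopA.induct (n := n) (euclides := euclides) with
  | case1 a ha hB =>
    rw [loopA, if_pos ha, if_pos hB]
    rw [loopB_iff] at hB
    obtain ⟨y, h1, h2, h3⟩ := hB
    exact iff_of_true rfl ⟨a, y, le_rfl, h1, h2, h3⟩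
  | case2 a ha hB ih =>
    rw [loopA, if_pos ha, if_neg hB, ih]
    rw [loopB_iff] at hB
    push Not at hB
    constructor
    · rintro ⟨x, y, h1, h2, h3, h4⟩; exact ⟨x, y, by omega, h2, h3, h4⟩
    · rintro ⟨x, y, h1, h2, h3, h4⟩
      refine ⟨x, y, ?_, h2, h3, h4⟩
      rcases eq_or_lt_of_le h1 with h | h
      · exact absurd h4 (by subst h; exact hB y h2 h3)
      · omega
  | case3 a ha =>
    rw [loopA, if_neg ha]
    simp only [Bool.false_eq_true, false_iff]
    rintro ⟨x, y, h1, h2, h3, _⟩; omega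

-- correctness of the two-pointer sweep: it finds some pair a ≤ x ≤ y ≤ b with x² + y² = c²
theorem twoPtr_iff (c a b : Int) :
    1 ≤ a → (twoPtr c a b = true ↔ ∃ x y, a ≤ x ∧ x ≤ y ∧ y ≤ b ∧ x * x + y * y = c * c) := by
  induction a, b using twoPtr.induct (c := c) with
  | case1 a b hab s heq =>
    intro _
    rw [twoPtr, if_pos hab]
    rw [if_pos (show (a * a + b * b == c * c) = true by simpa using heq)]
    exact iff_of_true rfl ⟨a, b, le_rfl, hab, le_rfl, by simpa using heq⟩
  | case2 a b hab s hne hlt ih =>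
    intro ha
    rw [twoPtr, if_pos hab]
    simp only [beq_iff_eq] at hne
    rw [if_neg (show ¬(a * a + b * b == c * c) = true by simpa using hne),
        if_pos (show a * a + b * b < c * c from hlt)]
    rw [ih (by omega)]
    constructor
    · rintro ⟨x, y, h1, h2, h3, h4⟩; exact ⟨x, y, by omega, h2, h3, h4⟩
    · rintro ⟨x, y, h1, h2, h3, h4⟩
      refine ⟨x, y, ?_, h2, h3, h4⟩
      rcases eq_or_lt_of_le h1 with h | h
      · subst h
        exfalso
        have hy : y * y ≤ b * b := by nlinarith
        nlinarith
      · omega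
  | case3 a b hab s hne hge ih =>
    intro ha
    rw [twoPtr, if_pos hab]
    simp only [beq_iff_eq] at hne
    rw [if_neg (show ¬(a * a + b * b == c * c) = true by simpa using hne),
        if_neg (show ¬a * a + b * b < c * c from hge)]
    rw [ih ha]
    constructor
    · rintro ⟨x, y, h1, h2, h3, h4⟩; exact ⟨x, y, h1, h2, by omega, h4⟩
    · rintro ⟨x, y, h1, h2, h3, h4⟩
      refine ⟨x, y, h1, h2, ?_, h4⟩
      rcases eq_or_lt_of_le h3 with h | h
      · subst h
        exfalso
        have hx : a * a ≤ x * x := by nlinarith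
        have h6 : c * c < a * a + y * y := lt_of_le_of_ne (not_lt.mp hge) (Ne.symm hne)
        linarith
      · omega
  | case4 a b hab =>
    intro _
    rw [twoPtr, if_neg hab]
    simp only [Bool.false_eq_true, false_iff]
    rintro ⟨x, y, h1, h2, h3, _⟩; omega

-- both per-c searches decide the same proposition: ∃ x y, 1 ≤ x ≤ y ≤ n-1 with x² + y² = c²
theorem cond_eq (n c : Int) : loopA n (c * c) 1 = twoPtr c 1 (n - 1) := by
  rw [Bool.eq_iff_iff, loopA_iff, twoPtr_iff c 1 (n - 1) le_rfl]
  constructor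
  · rintro ⟨x, y, h1, h2, h3, h4⟩; exact ⟨x, y, h1, h2, by omega, h4.symm⟩
  · rintro ⟨x, y, h1, h2, h3, h4⟩; exact ⟨x, y, h1, h2, by omega, h4.symm⟩

-- A's outer while-loop is B's fold over range(c, n+1)
theorem loopC_eq_foldl (n c soma : Int) :
    loopC n c soma =
      (PySem.List.pyRange c (n + 1) 1).foldl
        (fun soma c => if twoPtr c 1 (n - 1) then soma + c else soma) soma := by
  induction c, soma using loopC.induct (n := n) with
  | case1 c soma hc ih =>
    simp only [dite_eq_ite, cond_eq] at ih
    rw [loopC, if_pos hc, cond_eq, ih,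
        PySem.List.pyRange_one_cons (show c < n + 1 by omega), List.foldl_cons]
  | case2 c soma hc =>
    rw [loopC, if_neg hc, PySem.List.pyRange_one_eq_nil (by omega), List.foldl_nil]

-- ===== VERDICT (by name: the statement is the Claim_ definition above) =====
theorem soma_hipotenusas_spec : Claim_equal_soma_hipotenusas := by
  intro n _
  unfold Spec_soma_hipotenusas soma_hipotenusas soma_hipotenusas_alt
  exact loopC_eq_foldl n 1 0
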